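-- pv_equiv track=rewrite | github.com/alievent/harassment-analysis | utilities/utils.py | segment_sentences_train
-- ===== SOURCE A (Python) =====
-- def segment_sentences_train(docs, labels, delimiters):
--     segmented_docs = {}
--     segmented_labels ={}
--     for id in docs:
--         doc = docs[id]
--         label = labels[id]
--         sent = []
--         sent_label = []
--         segmented_doc = []
--         segmented_label = []
--         for j in range(len(doc)):
--             tk = doc[j]
--             l = label[j]
--             sent.append(tk)
--             sent_label.append(l)
--
--             if tk in delimiters:
--                 segmented_doc.append(sent)
--                 segmented_label.append(sent_label)
--                 assert len(sent) == len(sent_label)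
--                 sent =[]
--                 sent_label =[]
--         if len(sent) > 0 :
--             segmented_doc.append(sent)
--             segmented_label.append(sent_label)
--         assert len(segmented_doc) == len(segmented_label)
--         segmented_docs[id]= segmented_doc
--         segmented_labels[id]=segmented_label
--     return segmented_docs,segmented_labels
-- ===== SOURCE B (Python) =====
-- def segment_sentences_train(docs, labels, delimiters):
--     # Boundary-list decomposition: compute the cut indices, turn them into a list of
--     # (start, end) boundary pairs by zipping, and produce each sentence as one slice.
--     dset = set(delimiters)
--
--     def segment(doc, label):
--         n = len(doc)
--         cuts = [j for j in range(n) if doc[j] in dset]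
--         ends = [c + 1 for c in cuts]
--         pairs = [(a, b) for a, b in zip([0] + ends, ends + [n]) if a < b]
--         return [doc[a:b] for a, b in pairs], [label[a:b] for a, b in pairs]
--
--     segs = {id: segment(doc, labels[id]) for id, doc in docs.items()}
--     return {id: p[0] for id, p in segs.items()}, {id: p[1] for id, p in segs.items()}
-- ===== Notes on version B (the rewrite author's own statement) =====
-- stated objective: alternative
-- what changed: Replaces A's incremental token-by-token sentence accumulation and dict-insert loop with a boundary-list pipeline: collect the delimiter cut indices, zip them into (start, end) boundary pairs, emit each sentence as one slice, and build the result dicts by comprehension.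
import Mathlib
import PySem

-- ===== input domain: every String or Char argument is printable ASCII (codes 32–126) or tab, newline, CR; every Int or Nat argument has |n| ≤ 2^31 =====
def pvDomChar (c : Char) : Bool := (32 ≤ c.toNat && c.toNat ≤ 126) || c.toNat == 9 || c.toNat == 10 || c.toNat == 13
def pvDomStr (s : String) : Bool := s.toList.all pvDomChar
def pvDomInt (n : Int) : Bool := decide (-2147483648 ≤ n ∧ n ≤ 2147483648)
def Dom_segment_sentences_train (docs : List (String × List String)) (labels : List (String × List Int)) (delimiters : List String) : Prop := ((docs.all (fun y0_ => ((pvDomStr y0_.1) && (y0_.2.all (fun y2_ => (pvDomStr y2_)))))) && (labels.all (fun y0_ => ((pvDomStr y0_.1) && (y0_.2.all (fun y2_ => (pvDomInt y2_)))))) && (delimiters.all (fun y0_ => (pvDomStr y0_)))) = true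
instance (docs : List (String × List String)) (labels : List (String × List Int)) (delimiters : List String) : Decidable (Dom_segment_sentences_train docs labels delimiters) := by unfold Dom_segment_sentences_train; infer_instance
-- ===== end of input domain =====

-- B replaces A's token-by-token sentence accumulation by a boundary-list decomposition
-- (collect cut indices, zip them into (start, end) pairs, emit each sentence as one slice,
-- and build the result dicts by comprehension); same return value (alternative).

-- ===== PORT A =====
-- one step of A's inner 'for j in range(len(doc))' loop; state = (sent, sent_label, segmented_doc, segmented_label)
def stepA (delimiters : List String) (doc : List String) (label : List Int)
    (st : List String × List Int × List (List String) × List (List Int)) (j : Int) :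
    List String × List Int × List (List String) × List (List Int) :=
  let tk := PySem.List.pyGetD doc j ""
  let l := PySem.List.pyGetD label j 0   -- label[j]; IndexError (label shorter than doc) is excluded by Pre_
  let sent := st.1 ++ [tk]
  let sentL := st.2.1 ++ [l]
  if delimiters.contains tk then ([], [], st.2.2.1 ++ [sent], st.2.2.2 ++ [sentL])
  else (sent, sentL, st.2.2.1, st.2.2.2)

-- A's per-id body (inner loop plus the trailing 'if len(sent) > 0' append)
def segA (delimiters : List String) (doc : List String) (label : List Int) :
    List (List String) × List (List Int) :=
  let st := (PySem.List.pyRange 0 (doc.length : Int) 1).foldl (stepA delimiters doc label) ([], [], [], [])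
  if 0 < st.1.length then (st.2.2.1 ++ [st.1], st.2.2.2 ++ [st.2.1]) else (st.2.2.1, st.2.2.2)

def segment_sentences_train (docs : List (String × List String)) (labels : List (String × List Int)) (delimiters : List String) : (List (String × List (List String))) × (List (String × List (List Int))) :=
  let d := PySem.Dict.ofList docs
  let lab := PySem.Dict.ofList labels
  let st := d.items.foldl
    (fun (st : PySem.Dict String (List (List String)) × PySem.Dict String (List (List Int))) p =>
      let r := segA delimiters p.2 (lab.getD p.1 [])   -- labels[id]; KeyError is excluded by Pre_
      (st.1.insert p.1 r.1, st.2.insert p.1 r.2))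
    (PySem.Dict.empty, PySem.Dict.empty)
  (st.1.items, st.2.items)

-- ===== PORT B =====
-- xs[a:b] for natural bounds (= PySem.List.slice, lemma slice_natCast)
def pySliceN {α : Type} (xs : List α) (a b : Nat) : List α := (xs.drop a).take (b - a)

-- B's per-id body: cut indices → boundary pairs (zip + filter) → one slice per pair
def segC (dset : PySem.Set String) (doc : List String) (label : List Int) :
    List (List String) × List (List Int) :=
  let n := doc.length
  let cuts := (List.range n).filter (fun j => PySem.Set.contains dset (doc.getD j ""))
  let ends := cuts.map (· + 1)
  let pairs := ((0 :: ends).zip (ends ++ [n])).filter (fun p => p.1 < p.2)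
  (pairs.map (fun p => pySliceN doc p.1 p.2), pairs.map (fun p => pySliceN label p.1 p.2))

def segment_sentences_train_alt (docs : List (String × List String)) (labels : List (String × List Int)) (delimiters : List String) : (List (String × List (List String))) × (List (String × List (List Int))) :=
  let dset := PySem.Set.ofList delimiters
  let lab := PySem.Dict.ofList labels
  let segs := (PySem.Dict.ofList docs).items.map
    (fun p => (p.1, segC dset p.2 (lab.getD p.1 [])))
  ((PySem.Dict.ofList (segs.map (fun q => (q.1, q.2.1)))).items,
   (PySem.Dict.ofList (segs.map (fun q => (q.1, q.2.2)))).items)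

-- ===== PRECONDITION & SPEC =====
-- Pre_ excludes exactly the inputs where A raises: an id of docs missing from labels (KeyError)
-- or a document longer than its label sequence (IndexError on label[j]).
def Pre_segment_sentences_train (docs : List (String × List String)) (labels : List (String × List Int)) (delimiters : List String) : Prop :=
  ∀ p ∈ (PySem.Dict.ofList docs).items,
    (PySem.Dict.ofList labels).contains p.1 = true ∧
    p.2.length ≤ ((PySem.Dict.ofList labels).getD p.1 []).length
instance (docs : List (String × List String)) (labels : List (String × List Int)) (delimiters : List String) : Decidable (Pre_segment_sentences_train docs labels delimiters) := by unfold Pre_segment_sentences_train; infer_instance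
def pvWitness_segment_sentences_train : (List (String × List String)) × (List (String × List Int)) × List String :=
  ([("a", ["x", ".", "y"])], [("a", [1, 2, 3])], ["."])

def Spec_segment_sentences_train (docs : List (String × List String)) (labels : List (String × List Int)) (delimiters : List String) (out : (List (String × List (List String))) × (List (String × List (List Int)))) : Prop := out = segment_sentences_train_alt docs labels delimiters
instance (docs : List (String × List String)) (labels : List (String × List Int)) (delimiters : List String) (out : (List (String × List (List String))) × (List (String × List (List Int)))) : Decidable (Spec_segment_sentences_train docs labels delimiters out) := by unfold Spec_segment_sentences_train; infer_instance

-- ===== CLAIM =====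
def Claim_equal_segment_sentences_train : Prop := ∀ (docs : List (String × List String)) (labels : List (String × List Int)) (delimiters : List String), Dom_segment_sentences_train docs labels delimiters → Pre_segment_sentences_train docs labels delimiters → Spec_segment_sentences_train docs labels delimiters (segment_sentences_train docs labels delimiters)

-- ===== LEMMAS AND PROOFS =====

-- proof-side incremental middle man: B's slices generated left to right by a fold over the cuts
def stepB (doc : List String) (label : List Int)
    (st : Nat × List (List String) × List (List Int)) (c : Nat) :
    Nat × List (List String) × List (List Int) :=
  (c + 1, st.2.1 ++ [pySliceN doc st.1 (c + 1)], st.2.2 ++ [pySliceN label st.1 (c + 1)])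

def cutsOf (dset : PySem.Set String) (doc : List String) : List Nat :=
  (List.range doc.length).filter (fun j => PySem.Set.contains dset (doc.getD j ""))

def foldB (doc : List String) (label : List Int) (cuts : List Nat) :
    Nat × List (List String) × List (List Int) :=
  cuts.foldl (stepB doc label) (0, [], [])

def segB (dset : PySem.Set String) (doc : List String) (label : List Int) :
    List (List String) × List (List Int) :=
  let st := foldB doc label (cutsOf dset doc)
  if st.1 < doc.length then
    (st.2.1 ++ [pySliceN doc st.1 doc.length], st.2.2 ++ [pySliceN label st.1 doc.length])
  else (st.2.1, st.2.2)

-- B's zip-of-boundaries pipeline equals the fold over the cuts, generalized over the start index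
theorem pairs_fold (doc : List String) (label : List Int) (n : Nat) (cuts : List Nat)
    (hinc : cuts.Pairwise (· < ·)) (hlt : ∀ c ∈ cuts, c < n) :
    ∀ (prev : Nat) (P : List (List String)) (L : List (List Int)), (∀ c ∈ cuts, prev ≤ c) →
    (let pairs := ((prev :: cuts.map (· + 1)).zip (cuts.map (· + 1) ++ [n])).filter
        (fun p => p.1 < p.2)
     let st := cuts.foldl (stepB doc label) (prev, P, L)
     (P ++ pairs.map (fun p => pySliceN doc p.1 p.2),
      L ++ pairs.map (fun p => pySliceN label p.1 p.2)) =
       (if st.1 < n then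
          (st.2.1 ++ [pySliceN doc st.1 n], st.2.2 ++ [pySliceN label st.1 n])
        else (st.2.1, st.2.2))) := by
  induction cuts with
  | nil =>
      intro prev P L _
      by_cases h : prev < n <;> simp [List.zip, List.zipWith, h]
  | cons c cs ih =>
      intro prev P L hge
      have hpc : prev < c + 1 := by have := hge c (by simp); omega
      have hinc' := (List.pairwise_cons.mp hinc).2
      have hcge : ∀ c' ∈ cs, c + 1 ≤ c' := fun c' hc' =>
        (List.pairwise_cons.mp hinc).1 c' hc'
      simp only [List.map_cons, List.cons_append, List.zip_cons_cons, List.filter_cons,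
        hpc, decide_true, List.map_cons, List.foldl_cons]
      have := ih hinc' (fun c' hc' => hlt c' (by simp [hc'])) (c + 1)
        (P ++ [pySliceN doc prev (c + 1)]) (L ++ [pySliceN label prev (c + 1)]) hcge
      simpa [stepB, List.append_assoc] using this

theorem segC_eq_segB (dset : PySem.Set String) (doc : List String) (label : List Int) :
    segC dset doc label = segB dset doc label := by
  have hinc : (cutsOf dset doc).Pairwise (· < ·) :=
    List.Pairwise.filter _ List.pairwise_lt_range
  have hlt : ∀ c ∈ cutsOf dset doc, c < doc.length := fun c hc =>
    List.mem_range.mp (List.mem_filter.mp hc).1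
  have h := pairs_fold doc label doc.length (cutsOf dset doc) hinc hlt 0 [] []
    (fun c _ => Nat.zero_le c)
  simp only [List.nil_append] at h
  unfold segC segB foldB
  exact h

-- set(delimiters) membership agrees with A's list membership
theorem set_contains_ofList (ds : List String) (x : String) :
    PySem.Set.contains (PySem.Set.ofList ds) x = ds.contains x := by
  by_cases h : x ∈ ds <;>
    simp [PySem.Set.contains_eq_listContains, PySem.Set.mem_ofList, h]

-- A's step only reads doc below index doc.length, so appending to doc does not change it there
theorem stepA_append (delims : List String) (doc : List String) (x : String) (label : List Int)
    (st : List String × List Int × List (List String) × List (List Int)) (j : Int)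
    (h0 : 0 ≤ j) (h1 : j < (doc.length : Int)) :
    stepA delims (doc ++ [x]) label st j = stepA delims doc label st j := by
  have hd : PySem.List.pyGetD (doc ++ [x]) j "" = PySem.List.pyGetD doc j "" := by
    rw [PySem.List.pyGetD_eq_getElem _ _ h0 (by simp; omega),
        PySem.List.pyGetD_eq_getElem _ _ h0 (by exact_mod_cast h1),
        List.getElem_append_left]
  simp only [stepA, hd]

-- B's step at a cut below doc.length is unchanged when doc is extended
theorem stepB_append (doc : List String) (x : String) (label : List Int)
    (st : Nat × List (List String) × List (List Int)) (c : Nat) (hc : c < doc.length) :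
    stepB (doc ++ [x]) label st c = stepB doc label st c := by
  have hs : ∀ p : Nat, pySliceN (doc ++ [x]) p (c + 1) = pySliceN doc p (c + 1) := by
    intro p
    unfold pySliceN
    by_cases hp : p ≤ doc.length
    · rw [List.drop_append_of_le_length hp, List.take_append_of_le_length (by simp; omega)]
    · have h1 : c + 1 - p = 0 := by omega
      simp [h1]
  simp only [stepB, hs]

-- the collected cut indices of doc ++ [x]
theorem cuts_append (dset : PySem.Set String) (doc : List String) (x : String) :
    cutsOf dset (doc ++ [x]) =
      cutsOf dset doc ++ (if PySem.Set.contains dset x then [doc.length] else []) := by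
  unfold cutsOf
  have hlen : (doc ++ [x]).length = doc.length + 1 := by simp
  rw [hlen, List.range_succ, List.filter_append]
  congr 1
  · exact List.filter_congr (fun j hj => by
      have hjl : j < doc.length := List.mem_range.mp hj
      have hg : (doc ++ [x]).getD j "" = doc.getD j "" := by
        simp [List.getD, List.getElem?_append_left hjl]
      rw [hg])
  · have hx : (doc ++ [x]).getD doc.length "" = x := by simp [List.getD]
    by_cases hm : x ∈ dset <;>
      simp [List.filter, PySem.Set.contains_eq_listContains, hm]

-- mid-sentence label slice grows one element at a time
theorem take_label_succ (label : List Int) (p n : Nat) (hp : p ≤ n) (hn : n < label.length) :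
    (label.drop p).take (n + 1 - p) =
      (label.drop p).take (n - p) ++ [PySem.List.pyGetD label (n : Int) 0] := by
  have hg : PySem.List.pyGetD label (n : Int) 0 = label[n] :=
    PySem.List.pyGetD_eq_getElem _ _ (by positivity) (by exact_mod_cast hn)
  have h1 : n + 1 - p = (n - p) + 1 := by omega
  rw [hg, h1, List.take_add_one, List.getElem?_drop]
  have h2 : p + (n - p) = n := by omega
  simp [h2, hn]

-- the loop invariant: B's fold state determines A's loop state
theorem loop_inv (delims : List String) (doc : List String) (label : List Int)
    (h : doc.length ≤ label.length) :
    (foldB doc label (cutsOf (PySem.Set.ofList delims) doc)).1 ≤ doc.length ∧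
    (PySem.List.pyRange 0 (doc.length : Int) 1).foldl (stepA delims doc label) ([], [], [], [])
      = (doc.drop (foldB doc label (cutsOf (PySem.Set.ofList delims) doc)).1,
         (label.drop (foldB doc label (cutsOf (PySem.Set.ofList delims) doc)).1).take
           (doc.length - (foldB doc label (cutsOf (PySem.Set.ofList delims) doc)).1),
         (foldB doc label (cutsOf (PySem.Set.ofList delims) doc)).2.1,
         (foldB doc label (cutsOf (PySem.Set.ofList delims) doc)).2.2) := by
  induction doc using List.reverseRecOn with
  | nil =>
      simp [cutsOf, foldB, PySem.List.pyRange_one_eq_nil (le_refl 0)]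
  | append_singleton ds x ih =>
      have hlen1 : (ds ++ [x]).length = ds.length + 1 := by simp
      have hn : ds.length ≤ label.length := by omega
      have hnl : ds.length < label.length := by omega
      obtain ⟨ihle, iheq⟩ := ih hn
      have hmem : ∀ c ∈ cutsOf (PySem.Set.ofList delims) ds, c < ds.length := by
        intro c hc
        exact List.mem_range.mp (List.mem_filter.mp hc).1
      have hfoldc : (cutsOf (PySem.Set.ofList delims) ds).foldl
            (stepB (ds ++ [x]) label) (0, [], []) =
          (cutsOf (PySem.Set.ofList delims) ds).foldl (stepB ds label) (0, [], []) :=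
        PySem.List.foldl_congr_mem' _ _ _ _
          (fun c hc acc => stepB_append ds x label acc c (hmem c hc))
      have hr : PySem.List.pyRange 0 ((ds ++ [x]).length : Int) 1 =
          PySem.List.pyRange 0 (ds.length : Int) 1 ++ [(ds.length : Int)] := by
        have hl : ((ds ++ [x]).length : Int) = (ds.length : Int) + 1 := by
          rw [hlen1]; push_cast; ring
        rw [hl, PySem.List.pyRange_one_succ_right (by positivity)]
      have hfoldA : (PySem.List.pyRange 0 (ds.length : Int) 1).foldl
            (stepA delims (ds ++ [x]) label) ([], [], [], []) =
          (PySem.List.pyRange 0 (ds.length : Int) 1).foldl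
            (stepA delims ds label) ([], [], [], []) :=
        PySem.List.foldl_congr_mem' _ _ _ _ (fun j hj acc => by
          have hb := PySem.List.mem_pyRange_one.mp hj
          exact stepA_append delims ds x label acc j hb.1 hb.2)
      have htk : PySem.List.pyGetD (ds ++ [x]) ((ds.length : Nat) : Int) "" = x := by
        rw [PySem.List.pyGetD_eq_getElem _ _ (by positivity) (by simp)]
        simp
      have hslice2 : pySliceN label
            (foldB ds label (cutsOf (PySem.Set.ofList delims) ds)).1 (ds.length + 1) =
          (label.drop (foldB ds label (cutsOf (PySem.Set.ofList delims) ds)).1).take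
              (ds.length - (foldB ds label (cutsOf (PySem.Set.ofList delims) ds)).1) ++
            [PySem.List.pyGetD label ((ds.length : Nat) : Int) 0] := by
        exact take_label_succ label _ ds.length ihle hnl
      rw [hr, List.foldl_append, hfoldA, iheq, cuts_append, set_contains_ofList]
      by_cases hx : delims.contains x = true
      · -- x is a delimiter: A closes the sentence; B gains the cut ds.length
        have hcuts : foldB (ds ++ [x]) label
              (cutsOf (PySem.Set.ofList delims) ds ++ [ds.length]) =
            stepB (ds ++ [x]) label
              (foldB ds label (cutsOf (PySem.Set.ofList delims) ds)) ds.length := by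
          unfold foldB
          rw [List.foldl_append, hfoldc]
          rfl
        have hslice1 : pySliceN (ds ++ [x])
              (foldB ds label (cutsOf (PySem.Set.ofList delims) ds)).1 (ds.length + 1) =
            ds.drop (foldB ds label (cutsOf (PySem.Set.ofList delims) ds)).1 ++ [x] := by
          unfold pySliceN
          rw [List.drop_append_of_le_length ihle]
          exact List.take_of_length_le (by simp; omega)
        simp only [hx, if_true, hcuts]
        refine ⟨by simp [stepB, hlen1], ?_⟩
        rw [List.foldl_cons, List.foldl_nil]
        unfold stepA
        rw [htk]
        unfold pySliceN at hslice1 hslice2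
        simp only [hx, if_true, stepB, hlen1]
        unfold pySliceN
        have hdrop : (ds ++ [x]).drop (ds.length + 1) = [] := by simp
        simp [hslice1, hslice2, hdrop, List.getD, PySem.List.pyGetD_natCast]
      · -- x is not a delimiter: A extends the current sentence; B's cuts are unchanged
        have hx' : delims.contains x = false := by
          cases hc : delims.contains x
          · rfl
          · exact absurd hc hx
        have hcuts : foldB (ds ++ [x]) label
              (cutsOf (PySem.Set.ofList delims) ds) =
            foldB ds label (cutsOf (PySem.Set.ofList delims) ds) := by
          unfold foldB
          rw [hfoldc]
        simp only [hx', Bool.false_eq_true, if_false, List.append_nil, hcuts]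
        refine ⟨by omega, ?_⟩
        rw [List.foldl_cons, List.foldl_nil]
        unfold stepA
        rw [htk]
        unfold pySliceN at hslice2
        simp only [hx', Bool.false_eq_true, if_false, hlen1]
        rw [List.drop_append_of_le_length ihle, hslice2]

-- per-id equivalence: A's incremental body equals B's boundary-then-slice body
theorem seg_eq (delims : List String) (doc : List String) (label : List Int)
    (h : doc.length ≤ label.length) :
    segA delims doc label = segC (PySem.Set.ofList delims) doc label := by
  obtain ⟨hle, heq⟩ := loop_inv delims doc label h
  rw [segC_eq_segB]
  unfold segA segB
  rw [heq]
  by_cases hp : (foldB doc label (cutsOf (PySem.Set.ofList delims) doc)).1 < doc.length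
  · have hlen : (doc.drop (foldB doc label (cutsOf (PySem.Set.ofList delims) doc)).1).length =
        doc.length - (foldB doc label (cutsOf (PySem.Set.ofList delims) doc)).1 := by simp
    simp [hp, pySliceN, hlen, Nat.sub_pos_of_lt hp]
  · have hp' : doc.length ≤ (foldB doc label (cutsOf (PySem.Set.ofList delims) doc)).1 := by omega
    have hd : doc.drop (foldB doc label (cutsOf (PySem.Set.ofList delims) doc)).1 = [] :=
      List.drop_eq_nil_of_le (by omega)
    simp [hp, hd]

-- a Dict built from an association list with distinct keys has exactly that items list
theorem items_ofList_nodup {ν : Type} (ps : List (String × ν))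
    (h : (ps.map (fun p => p.1)).Nodup) : (PySem.Dict.ofList ps).items = ps := by
  have := PySem.Dict.items_foldl_insert_fresh ps (fun p => p.1) (fun p => p.2)
    PySem.Dict.empty (by simp [PySem.Dict.contains_empty]) h
  simpa using this

-- ===== VERDICT (by name: the statement is the Claim_ definition above) =====
theorem segment_sentences_train_spec : Claim_equal_segment_sentences_train := by
  intro docs labels delims _ hpre
  unfold Spec_segment_sentences_train segment_sentences_train segment_sentences_train_alt
  simp only []
  -- A's pair-of-dicts loop is two independent insert loops
  have hfold :
      (PySem.Dict.ofList docs).items.foldl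
        (fun (st : PySem.Dict String (List (List String)) × PySem.Dict String (List (List Int))) p =>
          (st.1.insert p.1 (segA delims p.2 ((PySem.Dict.ofList labels).getD p.1 [])).1,
           st.2.insert p.1 (segA delims p.2 ((PySem.Dict.ofList labels).getD p.1 [])).2))
        (PySem.Dict.empty, PySem.Dict.empty)
      = ((PySem.Dict.ofList docs).items.foldl
          (fun d p => d.insert p.1 (segA delims p.2 ((PySem.Dict.ofList labels).getD p.1 [])).1)
          PySem.Dict.empty,
         (PySem.Dict.ofList docs).items.foldl
          (fun d p => d.insert p.1 (segA delims p.2 ((PySem.Dict.ofList labels).getD p.1 [])).2)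
          PySem.Dict.empty) :=
    PySem.List.foldl_prod_mk
      (fun (d : PySem.Dict String (List (List String))) (p : String × List String) =>
        d.insert p.1 (segA delims p.2 ((PySem.Dict.ofList labels).getD p.1 [])).1)
      (fun (d : PySem.Dict String (List (List Int))) (p : String × List String) =>
        d.insert p.1 (segA delims p.2 ((PySem.Dict.ofList labels).getD p.1 [])).2)
      _ _ _
  rw [hfold]
  have hnodup : ((PySem.Dict.ofList docs).items.map (fun p => p.1)).Nodup :=
    PySem.Dict.nodup_keys_ofList docs
  -- A's insert loops from empty on the distinct doc keys append one pair per id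
  have hA1 := PySem.Dict.items_foldl_insert_fresh (PySem.Dict.ofList docs).items
    (fun p => p.1) (fun p => (segA delims p.2 ((PySem.Dict.ofList labels).getD p.1 [])).1)
    PySem.Dict.empty (by simp [PySem.Dict.contains_empty]) hnodup
  have hA2 := PySem.Dict.items_foldl_insert_fresh (PySem.Dict.ofList docs).items
    (fun p => p.1) (fun p => (segA delims p.2 ((PySem.Dict.ofList labels).getD p.1 [])).2)
    PySem.Dict.empty (by simp [PySem.Dict.contains_empty]) hnodup
  -- B's comprehension dicts reproduce their association lists (keys stay the distinct doc keys)
  have hB1 := items_ofList_nodup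
    (((PySem.Dict.ofList docs).items.map
      (fun p => (p.1, segC (PySem.Set.ofList delims) p.2 ((PySem.Dict.ofList labels).getD p.1 [])))).map
        (fun q => (q.1, q.2.1)))
    (by simpa [List.map_map, Function.comp] using hnodup)
  have hB2 := items_ofList_nodup
    (((PySem.Dict.ofList docs).items.map
      (fun p => (p.1, segC (PySem.Set.ofList delims) p.2 ((PySem.Dict.ofList labels).getD p.1 [])))).map
        (fun q => (q.1, q.2.2)))
    (by simpa [List.map_map, Function.comp] using hnodup)
  -- per id, A's incremental body equals B's boundary-then-slice body (Pre_ gives the length bound)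
  have hmap : ∀ p ∈ (PySem.Dict.ofList docs).items,
      segA delims p.2 ((PySem.Dict.ofList labels).getD p.1 []) =
        segC (PySem.Set.ofList delims) p.2 ((PySem.Dict.ofList labels).getD p.1 []) :=
    fun p hp => seg_eq _ _ _ (hpre p hp).2
  have he1 : (PySem.Dict.empty : PySem.Dict String (List (List String))).items = [] := rfl
  have he2 : (PySem.Dict.empty : PySem.Dict String (List (List Int))).items = [] := rfl
  refine Prod.ext ?_ ?_
  · rw [hA1, hB1, he1, List.nil_append]
    simp only [List.map_map]
    exact List.map_congr_left (fun p hp => by simp [Function.comp, hmap p hp])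
  · rw [hA2, hB2, he2, List.nil_append]
    simp only [List.map_map]
    exact List.map_congr_left (fun p hp => by simp [Function.comp, hmap p hp])
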